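-- pv_equiv track=rewrite | github.com/majung2/CTpractice | python/programmers/2018KAKAOBLINDRECRUITMENT/비밀지도.py | turnIntoMap
-- ===== SOURCE A (Python) =====
-- def turnIntoMap(n, arr):
--     Map = [[0 for _ in range(n)] for _ in range(n)]
--
--     for i in range(n):
--         temp = arr[i]
--         for j in range(n-1,-1,-1):
--             Map[i][j] = temp%2
--             temp//=2
--
--     return Map
-- ===== SOURCE B (Python) =====
-- def turnIntoMap(n, arr):
--     if n <= 0:
--         return []
--     size = 1 << n
--     return [[1 if c == '1' else 0 for c in format(a % size, 'b').zfill(n)]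
--             for a in arr[:n]]
-- ===== Notes on version B (the rewrite author's own statement) =====
-- stated objective: simpler
-- what changed: Replaces the preallocated n x n matrix mutated bit-by-bit with a running temp%2 // temp//=2 loop by a per-row closed form: mask the value to its low n bits with a % (1<<n) and read the zero-padded binary string format(m,'b').zfill(n) character by character.
import Mathlib
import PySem

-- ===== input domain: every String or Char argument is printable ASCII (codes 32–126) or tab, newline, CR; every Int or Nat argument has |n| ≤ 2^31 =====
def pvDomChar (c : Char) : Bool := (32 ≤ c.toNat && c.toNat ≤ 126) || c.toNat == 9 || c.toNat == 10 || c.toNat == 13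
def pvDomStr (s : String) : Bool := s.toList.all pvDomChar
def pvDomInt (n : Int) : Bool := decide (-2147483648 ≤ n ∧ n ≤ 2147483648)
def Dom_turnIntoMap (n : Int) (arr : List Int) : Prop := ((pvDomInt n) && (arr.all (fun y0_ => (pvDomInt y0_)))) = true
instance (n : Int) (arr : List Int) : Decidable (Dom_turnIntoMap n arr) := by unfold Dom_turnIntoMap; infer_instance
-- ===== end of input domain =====

-- B replaces A's preallocated n×n matrix filled bit-by-bit (temp%2, temp//=2, writing backwards)
-- by a per-row closed form: mask to the low n bits and read the zero-padded binary string (simpler).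

-- ===== PORT A =====
-- pyGetD/pySetD are used only at indices the loops keep in range (pyRange gives 0 ≤ i,j < n and
-- Pre_ gives i < len(arr)), where they are exactly Python's list indexing / item assignment.
def turnIntoMap (n : Int) (arr : List Int) : List (List Int) :=
  let Map : List (List Int) :=
    (PySem.List.pyRange 0 n 1).map (fun _ => (PySem.List.pyRange 0 n 1).map (fun _ => (0 : Int)))
  (PySem.List.pyRange 0 n 1).foldl
    (fun M i =>
      ((PySem.List.pyRange (n - 1) (-1) (-1)).foldl
        (fun (st : List (List Int) × Int) j =>
          (PySem.List.pySetD st.1 i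
             (PySem.List.pySetD (PySem.List.pyGetD st.1 i []) j (PySem.Int.mod st.2 2)),
           PySem.Int.floordiv st.2 2))
        (M, PySem.List.pyGetD arr i 0)).1)
    Map

-- ===== PORT B =====
def turnIntoMap_alt (n : Int) (arr : List Int) : List (List Int) :=
  if n ≤ 0 then []
  else
    let size : Int := (1 : Int) <<< n.toNat
    (PySem.List.slice arr none (some n)).map (fun a =>
      (PySem.Chars.zfill (PySem.Int.toBinChars (PySem.Int.mod a size)) n).map
        (fun c => if c = '1' then (1 : Int) else 0))

-- ===== PRECONDITION & SPEC =====
-- A raises IndexError on arr[i] exactly when len(arr) < n; Pre_ excludes only those inputs.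
def Pre_turnIntoMap (n : Int) (arr : List Int) : Prop := n ≤ arr.length
instance (n : Int) (arr : List Int) : Decidable (Pre_turnIntoMap n arr) := by
  unfold Pre_turnIntoMap; infer_instance
def pvWitness_turnIntoMap : Int × List Int := (2, [1, 2])

def Spec_turnIntoMap (n : Int) (arr : List Int) (out : List (List Int)) : Prop := out = turnIntoMap_alt n arr
instance (n : Int) (arr : List Int) (out : List (List Int)) : Decidable (Spec_turnIntoMap n arr out) := by unfold Spec_turnIntoMap; infer_instance

-- ===== CLAIM (what is proved, stated in full; the proofs are below) =====
def Claim_equal_turnIntoMap : Prop := ∀ (n : Int) (arr : List Int), Dom_turnIntoMap n arr → Pre_turnIntoMap n arr → Spec_turnIntoMap n arr (turnIntoMap n arr)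

-- ===== LEMMAS AND PROOFS =====

-- A's inner loop as a function of the bit count k: the low k bits of t, most significant first.
def pvRowA : Nat → Int → List Int
  | 0, _ => []
  | k + 1, t => pvRowA k (PySem.Int.floordiv t 2) ++ [PySem.Int.mod t 2]

-- the same row for a nonnegative (masked) value
def pvNatRow : Nat → Nat → List Int
  | 0, _ => []
  | k + 1, m => pvNatRow k (m / 2) ++ [((m % 2 : Nat) : Int)]

def pvDig (c : Char) : Int := if c = '1' then 1 else 0

lemma pvRowA_length (k : Nat) (t : Int) : (pvRowA k t).length = k := by
  induction k generalizing t with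
  | zero => rfl
  | succ k ih => simp [pvRowA, ih]

lemma pvNatRow_zero (k : Nat) : pvNatRow k 0 = List.replicate k 0 := by
  induction k with
  | zero => rfl
  | succ k ih => simp [pvNatRow, ih, List.replicate_succ']

lemma pvBridge (k : Nat) (a : Int) :
    pvRowA k a = pvNatRow k ((a % ((2 : Int) ^ k)).toNat) := by
  induction k generalizing a with
  | zero => rfl
  | succ k ih =>
    simp only [pvRowA, pvNatRow]
    rw [PySem.Int.floordiv_eq_ediv_of_pos (by norm_num : (0:Int) < 2),
        PySem.Int.mod_eq_emod_of_pos (by norm_num : (0:Int) < 2), ih]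
    have hp : (0:Int) < 2 ^ k := by positivity
    rw [show ((2:Int) ^ (k+1)) = 2 * 2 ^ k by ring]
    set p : Int := 2 ^ k with hpdef
    set e : Int := a % (2 * p) with hedef
    set q : Int := a / (2 * p) with hqdef
    have hq : 2 * p * q + e = a := Int.mul_ediv_add_emod a (2 * p)
    have he0 : 0 ≤ e := Int.emod_nonneg a (by positivity)
    have he1 : e < 2 * p := Int.emod_lt_of_pos a (by positivity)
    have ha : a = e + (p * q) * 2 := by linear_combination (-1 : Int) * hq
    have hdiv : a / 2 = e / 2 + p * q := by
      rw [ha, Int.add_mul_ediv_right _ _ (by norm_num : (2:Int) ≠ 0)]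
    have hmod2 : (e / 2 + p * q) % p = (e / 2) % p := Int.add_mul_emod_self_left (e/2) p q
    have hfin : (a / 2) % p = e / 2 := by
      rw [hdiv, hmod2, Int.emod_eq_of_lt (by omega) (by omega)]
    have hm2 : a % 2 = e % 2 := (Int.emod_emod_of_dvd a ⟨p, rfl⟩).symm
    congr 1
    · rw [hfin]; congr 1; omega
    · rw [hm2]; congr 1; omega

lemma pvDig_digitChar (r : Nat) (h : r < 2) : pvDig r.digitChar = (r : Int) := by
  interval_cases r <;> decide

lemma pvPad (k : Nat) : 1 ≤ k → ∀ m : Nat, m < 2 ^ k →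
    (List.replicate (k - (Nat.toDigits 2 m).length) '0' ++ Nat.toDigits 2 m).map pvDig
      = pvNatRow k m := by
  induction k with
  | zero => omega
  | succ k ih =>
    intro _ m hm
    by_cases hm2 : m < 2
    · rw [Nat.toDigits_of_lt_base hm2]
      have hk0 : m / 2 = 0 := by omega
      simp only [pvNatRow, hk0, pvNatRow_zero, List.length_cons, List.length_nil,
        Nat.add_sub_cancel, List.map_append]
      congr 1
      · simp [List.map_replicate, pvDig]
      · have := pvDig_digitChar m hm2
        simp only [List.map_cons, List.map_nil, this]
        rw [Nat.mod_eq_of_lt hm2]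
    · have hk1 : 1 ≤ k := by
        rcases Nat.eq_zero_or_pos k with rfl | h
        · simp at hm; omega
        · exact h
      have hrec : Nat.toDigits 2 m = Nat.toDigits 2 (m / 2) ++ [(m % 2).digitChar] := by
        rw [Nat.toDigits_eq_if (by norm_num : (1:Nat) < 2), if_neg hm2]
      have hm' : m / 2 < 2 ^ k := by
        have h2 : m < 2 * 2 ^ k := by
          have : (2:Nat) ^ (k+1) = 2 * 2 ^ k := by ring
          omega
        omega
      have hlen : (Nat.toDigits 2 (m/2)).length ≤ k :=
        (Nat.length_toDigits_le_iff (by norm_num) hk1).mpr hm'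
      rw [hrec]
      have hL : (Nat.toDigits 2 (m/2) ++ [(m % 2).digitChar]).length
          = (Nat.toDigits 2 (m/2)).length + 1 := by simp
      rw [hL, show (k + 1) - ((Nat.toDigits 2 (m/2)).length + 1)
            = k - (Nat.toDigits 2 (m/2)).length by omega,
          ← List.append_assoc, List.map_append]
      simp only [pvNatRow]
      congr 1
      · exact ih hk1 (m/2) hm'
      · simp [pvDig_digitChar (m % 2) (Nat.mod_lt m (by norm_num))]

lemma pvZfill (m : Nat) (w : Int) :
    PySem.Chars.zfill (Nat.toDigits 2 m) w
      = List.replicate (w.toNat - (Nat.toDigits 2 m).length) '0' ++ Nat.toDigits 2 m := by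
  have hne : Nat.toDigits 2 m ≠ [] := by
    have := @Nat.length_toDigits_pos 2 m
    intro h; rw [h] at this; simp at this
  obtain ⟨c, rest, hcr⟩ := List.exists_cons_of_ne_nil hne
  have hdig : c.isDigit := by
    apply Nat.isDigit_of_mem_toDigits (by norm_num : (0:Nat) < 2) (by norm_num : (2:Nat) ≤ 10)
    rw [hcr]; exact List.mem_cons_self
  have hc : ¬ (c = '+' ∨ c = '-') := by
    rintro (rfl | rfl) <;> simp [Char.isDigit] at hdig
  rw [hcr]
  simp only [PySem.Chars.zfill]
  by_cases hw : w ≤ ((c :: rest).length : Int)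
  · rw [if_pos hw]
    have h0 : w.toNat - (c :: rest).length = 0 := by
      simp only [List.length_cons] at hw ⊢; omega
    rw [h0]; simp
  · rw [if_neg hw, if_neg hc]

lemma pvRowEq (n' : Nat) (hn : 1 ≤ n') (x : Int) :
    (PySem.Chars.zfill (PySem.Int.toBinChars (PySem.Int.mod x ((1 : Int) <<< n'))) (n' : Int)).map
        (fun c => if c = '1' then (1 : Int) else 0)
      = pvRowA n' x := by
  have hsize : ((1:Int) <<< n') = 2 ^ n' := by rw [Int.shiftLeft_eq, one_mul]
  have hp : (0:Int) < 2 ^ n' := by positivity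
  rw [hsize, PySem.Int.mod_eq_emod_of_pos hp]
  set e : Int := x % ((2:Int) ^ n') with hedef
  have he0 : 0 ≤ e := Int.emod_nonneg x (by positivity)
  have he1 : e < 2 ^ n' := Int.emod_lt_of_pos x hp
  have htb : PySem.Int.toBinChars e = Nat.toDigits 2 e.toNat := by
    simp [PySem.Int.toBinChars, not_lt.mpr he0]
  have hm : e.toNat < 2 ^ n' := by
    have hcast : ((2 ^ n' : Nat) : Int) = (2:Int) ^ n' := by push_cast; ring
    omega
  have hfun : (fun c => if c = '1' then (1:Int) else 0) = pvDig := rfl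
  rw [htb, pvZfill, Int.toNat_natCast, hfun, pvPad n' hn e.toNat hm, pvBridge n' x]

lemma pvInner (i : Nat) : ∀ (k : Nat) (t : Int) (M : List (List Int)),
    i < M.length → k ≤ (M.getD i []).length →
    ((PySem.List.pyRange ((k : Int) - 1) (-1) (-1)).foldl
      (fun (st : List (List Int) × Int) j =>
        (PySem.List.pySetD st.1 (i : Int)
           (PySem.List.pySetD (PySem.List.pyGetD st.1 (i : Int) []) j (PySem.Int.mod st.2 2)),
         PySem.Int.floordiv st.2 2))
      (M, t)).1
    = M.set i (pvRowA k t ++ (M.getD i []).drop k) := by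
  intro k
  induction k with
  | zero =>
    intro t M hi _
    rw [PySem.List.pyRange_neg_one_eq_nil (by norm_num)]
    simp only [List.foldl_nil]
    simp only [pvRowA, List.nil_append, List.drop_zero]
    rw [List.getD_eq_getElem _ _ hi, List.set_getElem_self]
  | succ k ih =>
    intro t M hi hk
    rw [show (((k+1 : Nat) : Int) - 1) = ((k : Nat) : Int) by push_cast; ring]
    rw [PySem.List.pyRange_neg_one_cons (by omega : (-1:Int) < ((k:Nat):Int))]
    rw [List.foldl_cons]
    simp only [PySem.List.pySetD_natCast, PySem.List.pyGetD_natCast] at ih ⊢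
    have hrow : k < (M.getD i []).length := by omega
    have hgd2 : (M.set i ((M.getD i []).set k (PySem.Int.mod t 2))).getD i []
        = (M.getD i []).set k (PySem.Int.mod t 2) := by
      rw [List.getD_eq_getElem _ _ (by simpa using hi), List.getElem_set_self]
    rw [ih (PySem.Int.floordiv t 2)
          (M.set i ((M.getD i []).set k (PySem.Int.mod t 2)))
          (by simpa using hi)
          (by rw [hgd2]; simp only [List.length_set]; omega)]
    rw [hgd2, List.set_set]
    congr 1
    have hdropeq : ((M.getD i []).set k (PySem.Int.mod t 2)).drop k
        = PySem.Int.mod t 2 :: (M.getD i []).drop (k+1) := by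
      rw [List.drop_set, if_neg (lt_irrefl k), Nat.sub_self,
          List.drop_eq_getElem_cons hrow, List.set_cons_zero]
    rw [hdropeq]
    simp [pvRowA]

lemma pvOuter (arr : List Int) (n' : Nat) : ∀ (k : Nat) (M : List (List Int)),
    k ≤ n' → M.length = n' → (∀ r ∈ M, r.length = n') →
    (PySem.List.pyRange ((n' : Int) - (k : Int)) (n' : Int) 1).foldl
      (fun M i =>
        ((PySem.List.pyRange ((n' : Int) - 1) (-1) (-1)).foldl
          (fun (st : List (List Int) × Int) j =>
            (PySem.List.pySetD st.1 i
               (PySem.List.pySetD (PySem.List.pyGetD st.1 i []) j (PySem.Int.mod st.2 2)),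
             PySem.Int.floordiv st.2 2))
          (M, PySem.List.pyGetD arr i 0)).1) M
    = M.take (n' - k) ++ (PySem.List.pyRange ((n' : Int) - (k : Int)) (n' : Int) 1).map
        (fun i => pvRowA n' (PySem.List.pyGetD arr i 0)) := by
  intro k
  induction k with
  | zero =>
    intro M _ hlen _
    rw [show ((n':Int) - ((0:Nat):Int)) = (n':Int) by norm_num]
    rw [PySem.List.pyRange_one_eq_nil (le_refl _)]
    simp [List.take_of_length_le (le_of_eq hlen)]
  | succ k ih =>
    intro M hk hlen hrows
    have ha : ((n':Int) - ((k+1 : Nat):Int)) < (n':Int) := by push_cast; omega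
    rw [PySem.List.pyRange_one_cons ha, List.foldl_cons, List.map_cons]
    have hicast : ((n':Int) - ((k+1:Nat):Int)) = ((n' - (k+1) : Nat) : Int) := by push_cast; omega
    rw [hicast]
    set i : Nat := n' - (k+1) with hidef
    have hi : i < M.length := by omega
    have hrowlen : (M.getD i []).length = n' := by
      rw [List.getD_eq_getElem _ _ hi]; exact hrows _ (List.getElem_mem hi)
    rw [pvInner i n' (PySem.List.pyGetD arr (i:Int) 0) M hi (by omega)]
    rw [show (M.getD i []).drop n' = [] from List.drop_eq_nil_of_le (by omega), List.append_nil]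
    set v := pvRowA n' (PySem.List.pyGetD arr (i:Int) 0) with hv
    have h1 : (M.set i v).length = n' := by simp [hlen]
    have h2 : ∀ r ∈ M.set i v, r.length = n' := by
      intro r hr
      rcases List.mem_iff_getElem.mp hr with ⟨j, hj, rfl⟩
      rw [List.getElem_set]
      split
      · simp [hv, pvRowA_length]
      · exact hrows _ (List.getElem_mem _)
    rw [show ((i:Int) + 1) = ((n':Int) - ((k:Nat):Int)) by omega]
    rw [ih (M.set i v) (by omega) h1 h2]
    have hset : M.set i v = M.take i ++ v :: M.drop (i+1) := by
      rw [List.set_eq_take_append_cons_drop, if_pos (by omega)]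
    have hlentake : (M.take i).length = i := by rw [List.length_take]; omega
    have htake : (M.set i v).take (n' - k) = M.take i ++ [v] := by
      rw [hset, List.take_append, hlentake,
          show n' - k - i = 1 by omega,
          List.take_of_length_le (by omega),
          show List.take 1 (v :: M.drop (i+1)) = [v] by simp]
    rw [htake]
    simp

-- ===== VERDICT (by name: the statement is the Claim_ definition above) =====
theorem turnIntoMap_spec : Claim_equal_turnIntoMap := by
  intro n arr _ hpre
  unfold Spec_turnIntoMap
  by_cases hn : n ≤ 0
  · simp only [turnIntoMap, turnIntoMap_alt, if_pos hn]
    rw [PySem.List.pyRange_one_eq_nil hn]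
    simp
  · replace hn : 0 < n := by omega
    have hpre' : n.toNat ≤ arr.length := by
      unfold Pre_turnIntoMap at hpre; omega
    set n' : Nat := n.toNat with hn'def
    have hcast : n = (n' : Int) := by omega
    have hn'1 : 1 ≤ n' := by omega
    -- A side
    simp only [turnIntoMap, turnIntoMap_alt, hcast]
    rw [if_neg (by exact_mod_cast by omega : ¬ ((n' : Int) ≤ 0))]
    have houter := pvOuter arr n' n'
      ((PySem.List.pyRange 0 (n' : Int) 1).map
        (fun _ => (PySem.List.pyRange 0 (n' : Int) 1).map (fun _ => (0 : Int))))
      (le_refl n')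
      (by simp [PySem.List.length_pyRange_one])
      (by intro r hr
          rcases List.mem_map.mp hr with ⟨_, _, rfl⟩
          simp [PySem.List.length_pyRange_one])
    rw [show ((n':Int) - ((n':Nat):Int)) = 0 by ring] at houter
    rw [houter, Nat.sub_self, List.take_zero, List.nil_append]
    -- B side
    rw [PySem.List.slice_to arr (by positivity : (0:Int) ≤ ((n':Nat) : Int)), Int.toNat_natCast]
    apply List.ext_getElem
    · simp [PySem.List.length_pyRange_one]
      omega
    · intro idx h1 h2
      have hidx : idx < n' := by
        simpa [PySem.List.length_pyRange_one] using h1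
      have hidxa : idx < arr.length := by omega
      rw [List.getElem_map, List.getElem_map, PySem.List.getElem_pyRange_one,
          zero_add, PySem.List.pyGetD_natCast, List.getD_eq_getElem _ _ hidxa,
          List.getElem_take]
      exact (pvRowEq n' hn'1 arr[idx]).symm
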